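-- pv_equiv track=rewrite | github.com/SzaboNikolettaLaura/Kripto-laborok | Labor1/fel8.py | find_mapping
-- ===== SOURCE A (Python) =====
-- def find_mapping(ciphertext, plaintext):
--     """Find possible mapping from ciphertext to plaintext characters"""
--     mapping = {}
--     reverse_mapping = {}
--
--     # Split into words to analyze structure
--     cipher_words = ciphertext.split()
--     plain_words = plaintext.split()
--
--     # Check if word count matches
--     if len(cipher_words) != len(plain_words):
--         return None
--
--     # Check if word lengths match
--     for i, (cipher_word, plain_word) in enumerate(zip(cipher_words, plain_words)):
--         if len(cipher_word) != len(plain_word):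
--             return None
--
--     # Try to build the substitution map
--     for c, p in zip(ciphertext, plaintext):
--         if c == ' ' and p == ' ':
--             continue
--
--         if c in mapping:
--             # This cipher character was already mapped
--             if mapping[c] != p:
--                 return None  # Inconsistent mapping
--         elif p in reverse_mapping:
--             # This plain character was already mapped to
--             if reverse_mapping[p] != c:
--                 return None  # Inconsistent mapping
--         else:
--             # New mapping
--             mapping[c] = p
--             reverse_mapping[p] = c
--
--     return mapping
-- ===== SOURCE B (Python) =====
-- def find_mapping(ciphertext, plaintext):
--     """Find possible mapping from ciphertext to plaintext characters"""
--     cipher_words = ciphertext.split()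
--     plain_words = plaintext.split()
--
--     if len(cipher_words) != len(plain_words):
--         return None
--     if [len(w) for w in cipher_words] != [len(w) for w in plain_words]:
--         return None
--
--     # character pairs, ignoring aligned space pairs
--     pairs = [(c, p) for c, p in zip(ciphertext, plaintext) if (c, p) != (' ', ' ')]
--
--     # a consistent substitution exists iff any two pairs agree on their cipher
--     # characters exactly when they agree on their plain characters (this makes
--     # the pair relation both a function and injective)
--     for c, p in pairs:
--         for c2, p2 in pairs:
--             if (c == c2) != (p == p2):
--                 return None
--
--     mapping = {}
--     for c, p in pairs:
--         if c not in mapping: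
--             mapping[c] = p
--     return mapping
-- ===== Notes on version B (the rewrite author's own statement) =====
-- stated objective: alternative
-- what changed: B replaces A's incremental two-dict pass by a declarative check: it materialises the non-space character-pair list, validates it with a quadratic pairwise test (two pairs agree on cipher chars iff they agree on plain chars), and only then builds the mapping by keeping each cipher char's first pair; the word-length guard becomes a comparison of length lists instead of an early-return loop.
import Mathlib
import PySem

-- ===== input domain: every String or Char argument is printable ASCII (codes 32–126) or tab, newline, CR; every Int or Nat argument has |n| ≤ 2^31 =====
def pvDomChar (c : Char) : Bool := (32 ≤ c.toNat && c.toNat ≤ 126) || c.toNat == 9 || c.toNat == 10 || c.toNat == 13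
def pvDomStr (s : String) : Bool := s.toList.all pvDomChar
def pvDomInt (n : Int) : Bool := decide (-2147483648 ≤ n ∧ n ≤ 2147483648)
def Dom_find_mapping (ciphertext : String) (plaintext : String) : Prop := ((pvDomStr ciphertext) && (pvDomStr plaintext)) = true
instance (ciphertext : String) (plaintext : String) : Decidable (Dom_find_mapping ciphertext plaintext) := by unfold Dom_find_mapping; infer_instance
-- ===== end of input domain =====

-- B replaces A's incremental two-dict pass by a declarative quadratic pairwise compatibility
-- check on the materialised pair list, then builds the mapping in a separate pass (objective: alternative).

-- ===== PORT A =====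
-- A's word-length checking loop (early `return None` on the first mismatch)
def pvCheckLensA : List (String × String) → Bool
  | [] => true
  | (cw, pw) :: rest => if PySem.Str.len cw ≠ PySem.Str.len pw then false else pvCheckLensA rest

-- A's main loop: forward dict `mapping` and reverse dict `reverse_mapping`
def pvLoopA : List (Char × Char) → PySem.Dict Char Char → PySem.Dict Char Char → Option (PySem.Dict Char Char)
  | [], m, _ => some m
  | (c, p) :: rest, m, rm =>
    if c = ' ' ∧ p = ' ' then pvLoopA rest m rm
    else
      match m.get? c with
      | some v => if v ≠ p then none else pvLoopA rest m rm
      | none =>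
        match rm.get? p with
        | some v => if v ≠ c then none else pvLoopA rest m rm
        | none => pvLoopA rest (m.insert c p) (rm.insert p c)

def find_mapping (ciphertext : String) (plaintext : String) : Option (List (String × String)) :=
  let cipher_words := PySem.Str.split₀ ciphertext
  let plain_words := PySem.Str.split₀ plaintext
  if cipher_words.length ≠ plain_words.length then none
  else if pvCheckLensA (cipher_words.zip plain_words) = false then none
  else
    match pvLoopA (ciphertext.toList.zip plaintext.toList) PySem.Dict.empty PySem.Dict.empty with
    | none => none
    | some m => some (m.items.map (fun q => (String.ofList [q.1], String.ofList [q.2])))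

-- ===== PORT B =====
-- B's pairwise compatibility test: the two nested `for` loops with early return
def pvCompatB (pairs : List (Char × Char)) : Bool :=
  pairs.all (fun q => pairs.all (fun q2 => (q.1 == q2.1) == (q.2 == q2.2)))

-- B's final build loop (`if c not in mapping: mapping[c] = p`)
def pvBuildB : List (Char × Char) → PySem.Dict Char Char → PySem.Dict Char Char
  | [], m => m
  | (c, p) :: rest, m => if m.contains c then pvBuildB rest m else pvBuildB rest (m.insert c p)

def find_mapping_alt (ciphertext : String) (plaintext : String) : Option (List (String × String)) :=
  let cipher_words := PySem.Str.split₀ ciphertext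
  let plain_words := PySem.Str.split₀ plaintext
  if cipher_words.length ≠ plain_words.length then none
  else if cipher_words.map PySem.Str.len ≠ plain_words.map PySem.Str.len then none
  else
    let pairs := (ciphertext.toList.zip plaintext.toList).filter (fun q => !decide (q = (' ', ' ')))
    if pvCompatB pairs = false then none
    else some ((pvBuildB pairs PySem.Dict.empty).items.map (fun q => (String.ofList [q.1], String.ofList [q.2])))

-- ===== PRECONDITION & SPEC =====
def Spec_find_mapping (ciphertext : String) (plaintext : String) (out : Option (List (String × String))) : Prop := out = find_mapping_alt ciphertext plaintext
instance (ciphertext : String) (plaintext : String) (out : Option (List (String × String))) : Decidable (Spec_find_mapping ciphertext plaintext out) := by unfold Spec_find_mapping; infer_instance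

-- ===== CLAIM (what is proved, stated in full; the proofs are below) =====
def Claim_equal_find_mapping : Prop := ∀ (ciphertext : String) (plaintext : String), Dom_find_mapping ciphertext plaintext → Spec_find_mapping ciphertext plaintext (find_mapping ciphertext plaintext)

-- ===== LEMMAS AND PROOFS =====

-- pvCompatB as a proposition
theorem compatB_iff (l : List (Char × Char)) :
    pvCompatB l = true ↔ ∀ q ∈ l, ∀ q' ∈ l, (q.1 = q'.1 ↔ q.2 = q'.2) := by
  simp only [pvCompatB, List.all_eq_true]
  constructor
  · intro h q hq q' hq'
    have h' : (q.1 == q'.1) = (q.2 == q'.2) := by simpa using h q hq q' hq'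
    constructor
    · intro he
      have : (q.2 == q'.2) = true := by rw [← h']; simp [he]
      simpa using this
    · intro he
      have : (q.1 == q'.1) = true := by rw [h']; simp [he]
      simpa using this
  · intro h q hq q' hq'
    have h' := h q hq q' hq'
    by_cases h1 : q.1 = q'.1
    · simp [h1, h'.1 h1]
    · have h2 : ¬ q.2 = q'.2 := fun he => h1 (h'.2 he)
      simp [h1, h2]

-- pvCompatB depends only on the member set
theorem compatB_congr (l l' : List (Char × Char)) (h : ∀ x, x ∈ l ↔ x ∈ l') :
    pvCompatB l = pvCompatB l' := by
  cases hl : pvCompatB l <;> cases hl' : pvCompatB l' <;> try rfl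
  · exact absurd ((compatB_iff l).2 (fun q hq q' hq' =>
      (compatB_iff l').1 hl' q ((h q).1 hq) q' ((h q').1 hq'))) (by simp [hl])
  · exact absurd ((compatB_iff l').2 (fun q hq q' hq' =>
      (compatB_iff l).1 hl q ((h q).2 hq) q' ((h q').2 hq'))) (by simp [hl'])

-- a dict with nodup keys and nodup values is internally compatible
theorem compatB_items (m : PySem.Dict Char Char)
    (hk : (m.items.map Prod.fst).Nodup) (hv : (m.items.map Prod.snd).Nodup) :
    pvCompatB m.items = true := by
  refine (compatB_iff _).2 (fun q hq q' hq' => ?_)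
  constructor
  · intro h; exact congrArg Prod.snd (List.inj_on_of_nodup_map hk hq hq' h)
  · intro h; exact congrArg Prod.fst (List.inj_on_of_nodup_map hv hq hq' h)

-- the main loop correspondence
theorem loopA_eq : ∀ (pairs : List (Char × Char)) (m rm : PySem.Dict Char Char),
    m.keys.Nodup → rm.keys.Nodup → rm.items = m.items.map Prod.swap →
    pvLoopA pairs m rm =
      (if pvCompatB (m.items ++ pairs.filter (fun q => !decide (q = (' ', ' ')))) = true
       then some (pvBuildB (pairs.filter (fun q => !decide (q = (' ', ' ')))) m)
       else none) := by
  intro pairs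
  induction pairs with
  | nil =>
    intro m rm hm hrm heq
    have hv : (m.items.map Prod.snd).Nodup := by
      have : rm.keys = m.items.map Prod.snd := by
        simp only [PySem.Dict.keys, heq, List.map_map]; rfl
      rw [← this]; exact hrm
    have := compatB_items m (by simpa [PySem.Dict.keys] using hm) hv
    simp [pvBuildB, pvLoopA, this]
  | cons q rest ih =>
    intro m rm hm hrm heq
    obtain ⟨c, p⟩ := q
    by_cases hsp : c = ' ' ∧ p = ' '
    · have hf : (decide (((c, p) : Char × Char) = (' ', ' '))) = true := by
        simp [hsp.1, hsp.2]
      simp only [pvLoopA, if_pos hsp, List.filter_cons, hf, Bool.not_true,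
        Bool.false_eq_true, if_false]
      exact ih m rm hm hrm heq
    · have hf : (decide (((c, p) : Char × Char) = (' ', ' '))) = false := by
        simp only [decide_eq_false_iff_not]
        intro h; exact hsp ⟨congrArg Prod.fst h, congrArg Prod.snd h⟩
      simp only [pvLoopA, if_neg hsp, List.filter_cons, hf, Bool.not_false, if_true]
      set restF := rest.filter (fun q => !decide (q = (' ', ' '))) with hrestF
      cases hmc : m.get? c with
      | some v =>
        have hmem : (c, v) ∈ m.items := PySem.Dict.mem_items_of_get?_eq_some m hmc
        have hcont : m.contains c = true := by
          rw [PySem.Dict.contains_eq_isSome_get?, hmc]; rfl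
        dsimp only
        by_cases hvp : v = p
        · subst hvp
          rw [if_neg (show ¬ v ≠ v from fun h => h rfl)]
          rw [ih m rm hm hrm heq]
          have hcg : pvCompatB (m.items ++ restF) = pvCompatB (m.items ++ (c, v) :: restF) := by
            apply compatB_congr
            intro x
            simp only [List.mem_append, List.mem_cons]
            constructor
            · rintro (h | h)
              · exact Or.inl h
              · exact Or.inr (Or.inr h)
            · rintro (h | h | h)
              · exact Or.inl h
              · exact Or.inl (h ▸ hmem)
              · exact Or.inr h
          rw [hcg]
          simp [pvBuildB, hcont]
        · rw [if_pos hvp]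
          have hbad : pvCompatB (m.items ++ (c, p) :: restF) = false := by
            cases hcb : pvCompatB (m.items ++ (c, p) :: restF) with
            | false => rfl
            | true =>
              have := (compatB_iff _).1 hcb (c, v) (List.mem_append.2 (Or.inl hmem))
                (c, p) (List.mem_append.2 (Or.inr (List.mem_cons_self)))
              exact absurd (this.1 rfl) hvp
          rw [hbad]
          simp
      | none =>
        have hcont : m.contains c = false := (PySem.Dict.get?_eq_none_iff_contains m c).1 hmc
        cases hrmp : rm.get? p with
        | some v =>
          have hmem : (v, p) ∈ m.items := by
            have := PySem.Dict.mem_items_of_get?_eq_some rm hrmp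
            rw [heq] at this
            rcases List.mem_map.1 this with ⟨⟨a, b⟩, hab, hswap⟩
            cases hswap
            simpa using hab
          have hvc : v ≠ c := by
            intro h; subst h
            have := PySem.Dict.get?_of_mem_items m hmem hm
            rw [hmc] at this; simp at this
          dsimp only
          rw [if_pos hvc]
          have hbad : pvCompatB (m.items ++ (c, p) :: restF) = false := by
            cases hcb : pvCompatB (m.items ++ (c, p) :: restF) with
            | false => rfl
            | true =>
              have := (compatB_iff _).1 hcb (v, p) (List.mem_append.2 (Or.inl hmem))
                (c, p) (List.mem_append.2 (Or.inr (List.mem_cons_self)))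
              exact absurd (this.2 rfl) hvc
          rw [hbad]
          simp
        | none =>
          have hrcont : rm.contains p = false := (PySem.Dict.get?_eq_none_iff_contains rm p).1 hrmp
          dsimp only
          rw [ih (m.insert c p) (rm.insert p c)
            (PySem.Dict.nodup_keys_insert m c p hm)
            (PySem.Dict.nodup_keys_insert rm p c hrm)
            (by
              rw [PySem.Dict.items_insert_of_not_contains m p hcont,
                PySem.Dict.items_insert_of_not_contains rm c hrcont, heq, List.map_append]
              rfl)]
          have hitems : (m.insert c p).items = m.items ++ [(c, p)] :=
            PySem.Dict.items_insert_of_not_contains m p hcont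
          have hcg : pvCompatB ((m.insert c p).items ++ restF)
              = pvCompatB (m.items ++ (c, p) :: restF) := by
            apply compatB_congr
            intro x
            simp only [hitems, List.append_assoc, List.singleton_append, List.mem_append,
              List.mem_cons]
          rw [hcg]
          cases hcb : pvCompatB (m.items ++ (c, p) :: restF) with
          | false => simp
          | true =>
            simp [pvBuildB, hcont]

-- the two word-length guards agree when the word counts do
theorem lens_eq : ∀ (cw pw : List String), cw.length = pw.length →
    (pvCheckLensA (cw.zip pw) = false ↔ cw.map PySem.Str.len ≠ pw.map PySem.Str.len) := by
  intro cw
  induction cw with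
  | nil =>
    intro pw hl
    cases pw with
    | nil => simp [pvCheckLensA]
    | cons _ _ => simp at hl
  | cons x xs ih =>
    intro pw hl
    cases pw with
    | nil => simp at hl
    | cons y ys =>
      simp only [List.length_cons, Nat.add_right_cancel_iff] at hl
      by_cases h : x.length = y.length
      · have hstep : pvCheckLensA ((x, y) :: xs.zip ys) = pvCheckLensA (xs.zip ys) := by
          simp [pvCheckLensA, PySem.Str.len, h]
        rw [List.zip_cons_cons, hstep, ih ys hl]
        simp [PySem.Str.len, h]
      · have hstep : pvCheckLensA ((x, y) :: xs.zip ys) = false := by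
          simp [pvCheckLensA, PySem.Str.len, h]
        rw [List.zip_cons_cons, hstep]
        simp [PySem.Str.len, h]

-- ===== VERDICT (by name: the statement is the Claim_ definition above) =====
theorem find_mapping_spec : Claim_equal_find_mapping := by
  intro ciphertext plaintext _
  unfold Spec_find_mapping find_mapping find_mapping_alt
  dsimp only
  by_cases h1 : (PySem.Str.split₀ ciphertext).length = (PySem.Str.split₀ plaintext).length
  · rw [if_neg (show ¬ (PySem.Str.split₀ ciphertext).length ≠ (PySem.Str.split₀ plaintext).length from fun h => h h1),
      if_neg (show ¬ (PySem.Str.split₀ ciphertext).length ≠ (PySem.Str.split₀ plaintext).length from fun h => h h1)]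
    by_cases h2 : pvCheckLensA ((PySem.Str.split₀ ciphertext).zip (PySem.Str.split₀ plaintext)) = false
    · rw [if_pos h2, if_pos ((lens_eq _ _ h1).1 h2)]
    · rw [if_neg h2,
        if_neg (show ¬ (PySem.Str.split₀ ciphertext).map PySem.Str.len ≠ (PySem.Str.split₀ plaintext).map PySem.Str.len from
          fun h => h2 ((lens_eq _ _ h1).2 h))]
      rw [loopA_eq (ciphertext.toList.zip plaintext.toList) PySem.Dict.empty PySem.Dict.empty
        (by simp [PySem.Dict.keys_empty]) (by simp [PySem.Dict.keys_empty]) rfl]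
      have hemp : (PySem.Dict.empty : PySem.Dict Char Char).items = [] := rfl
      rw [hemp, List.nil_append]
      cases hc : pvCompatB ((ciphertext.toList.zip plaintext.toList).filter (fun q => !decide (q = (' ', ' ')))) with
      | false => simp
      | true => simp
  · rw [if_pos h1, if_pos h1]
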